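-- pv_equiv track=rewrite | github.com/DoeSEResearch/ProcVD | src/step2_subgraph/cpg_extractor.py | get_file_extension
-- ===== SOURCE A (Python) =====
-- SUPPORTED_C_EXTENSIONS = {'.c', '.h'}
--
-- SUPPORTED_CPP_EXTENSIONS = {'.cpp', '.cxx', '.cc', '.c++', '.hpp', '.hxx', '.h++'}
--
-- CPP_INDICATORS = {'cpp', 'cxx', 'cc', '++'}
--
-- def get_file_extension(file_name: str) -> str:
--     """
--     Determine appropriate file extension based on file name
--
--     Args:
--         file_name: Original file name
--
--     Returns:
--         Appropriate extension (.c or .cpp)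
--     """
--     if not file_name:
--         return ".c"
--
--     file_name_lower = file_name.lower()
--
--     # Check for C++ extensions
--     if any(file_name_lower.endswith(ext) for ext in SUPPORTED_CPP_EXTENSIONS):
--         return ".cpp"
--
--     # Check for C extensions
--     if any(file_name_lower.endswith(ext) for ext in SUPPORTED_C_EXTENSIONS):
--         if file_name_lower.endswith('.h'):
--             # Header file heuristic: check for C++ indicators
--             if any(indicator in file_name_lower for indicator in CPP_INDICATORS):
--                 return ".cpp"
--         return ".c"
--
--     # Default to C
--     return ".c"
-- ===== SOURCE B (Python) =====
-- SUPPORTED_C_EXTENSIONS = {'.c', '.h'}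
-- SUPPORTED_CPP_EXTENSIONS = {'.cpp', '.cxx', '.cc', '.c++', '.hpp', '.hxx', '.h++'}
-- CPP_INDICATORS = {'cpp', 'cxx', 'cc', '++'}
--
-- def get_file_extension(file_name: str) -> str:
--     """Classify by the explicit extension (text from the last '.'), instead of
--     trying endswith against every supported extension."""
--     name = file_name.lower()
--     idx = name.rfind('.')
--     ext = name[idx:] if idx != -1 else ''
--     if ext in SUPPORTED_CPP_EXTENSIONS:
--         return ".cpp"
--     if ext == '.c':
--         return ".c"
--     if ext == '.h':
--         if any(indicator in name for indicator in CPP_INDICATORS):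
--             return ".cpp"
--         return ".c"
--     return ".c"
-- ===== Notes on version B (the rewrite author's own statement) =====
-- stated objective: simpler
-- what changed: B extracts the actual extension once (lowercase, rfind the last dot, take the suffix) and classifies it by direct set membership / equality, instead of A's chain of endswith tests against every supported extension.
import Mathlib
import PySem

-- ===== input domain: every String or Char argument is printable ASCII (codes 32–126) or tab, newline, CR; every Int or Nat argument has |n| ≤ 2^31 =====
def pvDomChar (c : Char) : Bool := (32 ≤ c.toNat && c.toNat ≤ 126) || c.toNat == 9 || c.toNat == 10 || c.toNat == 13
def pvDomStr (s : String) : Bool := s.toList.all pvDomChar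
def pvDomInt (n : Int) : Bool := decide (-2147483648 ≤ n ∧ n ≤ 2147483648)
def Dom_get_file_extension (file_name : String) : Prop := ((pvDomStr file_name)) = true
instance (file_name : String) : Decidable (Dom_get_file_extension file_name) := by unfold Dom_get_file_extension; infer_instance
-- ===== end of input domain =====

-- B extracts the extension once (last '.') and classifies it by membership, instead of A's
-- endswith chain over every supported extension; objective: simpler.

-- module-level constants of the Python file (set literals, iterated by `any` / tested by `in`)
def pvSupportedCExtensions : List String := [".c", ".h"]
def pvSupportedCppExtensions : List String := [".cpp", ".cxx", ".cc", ".c++", ".hpp", ".hxx", ".h++"]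
def pvCppIndicators : List String := ["cpp", "cxx", "cc", "++"]

-- ===== PORT A =====
def get_file_extension (file_name : String) : String :=
  if file_name == "" then ".c"
  else
    let file_name_lower := PySem.Str.lower file_name
    if pvSupportedCppExtensions.any (fun ext => PySem.Str.endswith file_name_lower ext) then ".cpp"
    else if pvSupportedCExtensions.any (fun ext => PySem.Str.endswith file_name_lower ext) then
      if PySem.Str.endswith file_name_lower ".h" then
        if pvCppIndicators.any (fun indicator => PySem.Str.isIn indicator file_name_lower) then ".cpp"
        else ".c"
      else ".c"
    else ".c"

-- ===== PORT B =====
def get_file_extension_alt (file_name : String) : String :=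
  let name := PySem.Str.lower file_name
  let idx := PySem.Str.rfind name "."
  let ext := if idx == -1 then "" else PySem.Str.slice name (some idx) none
  if pvSupportedCppExtensions.contains ext then ".cpp"
  else if ext == ".c" then ".c"
  else if ext == ".h" then
    if pvCppIndicators.any (fun indicator => PySem.Str.isIn indicator name) then ".cpp"
    else ".c"
  else ".c"

-- ===== PRECONDITION & SPEC =====
def Spec_get_file_extension (file_name : String) (out : String) : Prop := out = get_file_extension_alt file_name
instance (file_name : String) (out : String) : Decidable (Spec_get_file_extension file_name out) := by unfold Spec_get_file_extension; infer_instance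

-- ===== CLAIM (what is proved, stated in full; the proofs are below) =====
def Claim_equal_get_file_extension : Prop := ∀ (file_name : String), Dom_get_file_extension file_name → Spec_get_file_extension file_name (get_file_extension file_name)

-- ===== LEMMAS AND PROOFS =====

-- ['.'] is a prefix of `s.drop i` exactly when the character at index i is '.'
theorem pvPrefixDot (s : List Char) (i : Nat) :
    (['.'].isPrefixOf (List.drop i s)) = (s[i]? == some '.') := by
  rw [← List.head?_drop]
  rcases List.drop i s with _ | ⟨c, r⟩ <;> simp [List.isPrefixOf, eq_comm]

-- spec of the scan `rfind.go s ['.'] n`: the largest index ≤ n holding '.', else -1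
theorem pvGoSpec (s : List Char) (n : Nat) :
    (PySem.Chars.rfind.go s ['.'] n = -1 ∧ ∀ i ≤ n, s[i]? ≠ some '.') ∨
    (∃ j, j ≤ n ∧ s[j]? = some '.' ∧ (∀ i, j < i → i ≤ n → s[i]? ≠ some '.') ∧
      PySem.Chars.rfind.go s ['.'] n = (j : Int)) := by
  induction n with
  | zero =>
    rw [PySem.Chars.rfind.go]
    have h0 := pvPrefixDot s 0
    rw [List.drop_zero] at h0
    by_cases h : s[0]? = some '.'
    · right; exact ⟨0, le_refl 0, h, by omega, by simp [h0, h]⟩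
    · left
      refine ⟨by simp [h0, h], ?_⟩
      intro i hi; interval_cases i; exact h
  | succ m ih =>
    rw [PySem.Chars.rfind.go]
    by_cases h : s[m+1]? = some '.'
    · right
      exact ⟨m + 1, le_refl _, h, by omega, by simp [pvPrefixDot, h]⟩
    · rcases ih with ⟨he, hall⟩ | ⟨j, hj, hdot, habove, he⟩
      · left
        refine ⟨by simp [pvPrefixDot, h, he], ?_⟩
        intro i hi
        rcases Nat.lt_or_ge i (m+1) with hlt | hge
        · exact hall i (by omega)
        · have : i = m + 1 := by omega
          simpa [this] using h
      · right
        refine ⟨j, by omega, hdot, ?_, by simp [pvPrefixDot, h, he]⟩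
        intro i h1 h2
        rcases Nat.lt_or_ge i (m+1) with hlt | hge
        · exact habove i h1 (by omega)
        · have : i = m + 1 := by omega
          simpa [this] using h

-- `rfind cs "."` either reports no dot at all, or splits cs at its LAST dot
theorem pvRfindDot (cs : List Char) :
    (PySem.Chars.rfind cs ['.'] = -1 ∧ '.' ∉ cs) ∨
    (∃ u t, cs = u ++ '.' :: t ∧ '.' ∉ t ∧ PySem.Chars.rfind cs ['.'] = (u.length : Int)) := by
  rcases pvGoSpec cs cs.length with ⟨he, hall⟩ | ⟨j, hj, hdot, habove, he⟩
  · left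
    refine ⟨he, ?_⟩
    intro hmem
    obtain ⟨i, hi, hgi⟩ := List.getElem_of_mem hmem
    exact hall i (by omega) (by simp [List.getElem?_eq_getElem hi, hgi])
  · right
    have hjlt : j < cs.length := by
      by_contra hge
      simp [List.getElem?_eq_none (by omega : cs.length ≤ j)] at hdot
    refine ⟨cs.take j, cs.drop (j+1), ?_, ?_, ?_⟩
    · have hc : cs[j] = '.' :=
        Option.some.inj ((List.getElem?_eq_getElem hjlt).symm.trans hdot)
      calc cs = cs.take j ++ cs.drop j := (List.take_append_drop j cs).symm
        _ = cs.take j ++ '.' :: cs.drop (j+1) := by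
            rw [List.drop_eq_getElem_cons hjlt, hc]
    · intro hmem
      obtain ⟨i, hi, hgi⟩ := List.getElem_of_mem hmem
      rw [List.getElem_drop] at hgi
      have hi' : j + 1 + i < cs.length := by
        simp only [List.length_drop] at hi; omega
      exact habove (j + 1 + i) (by omega) (by omega)
        (by simp [List.getElem?_eq_getElem hi', hgi])
    · rw [PySem.Chars.rfind, he, List.length_take]
      congr 1
      omega

-- a pattern '.'::t' is a suffix of u ++ '.'::t (t, t' dot-free) exactly when t' = t
theorem pvEndsIff (u t t' : List Char) (ht : '.' ∉ t) (ht' : '.' ∉ t') :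
    ('.' :: t') <:+ (u ++ '.' :: t) ↔ t' = t := by
  constructor
  · intro hsuf
    have hsuf2 : ('.' :: t) <:+ (u ++ '.' :: t) := List.suffix_append_of_suffix (List.suffix_refl _)
    rcases List.suffix_or_suffix_of_suffix hsuf hsuf2 with hc | hc
    · rcases (List.suffix_cons_iff).mp hc with heq | hsub
      · exact (List.cons.injEq _ _ _ _ ▸ heq).2
      · exact absurd (hsub.subset (by simp)) ht
    · rcases (List.suffix_cons_iff).mp hc with heq | hsub
      · exact ((List.cons.injEq _ _ _ _ ▸ heq).2).symm
      · exact absurd (hsub.subset (by simp)) ht'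
  · rintro rfl
    exact List.suffix_append_of_suffix (List.suffix_refl _)

-- if cs has no dot, no pattern starting with '.' is a suffix of cs
theorem pvNoDotEnds (cs t' : List Char) (h : '.' ∉ cs) : ¬ ('.' :: t') <:+ cs := by
  intro hsuf
  exact h (hsuf.subset (by simp))

-- ===== VERDICT (by name: the statement is the Claim_ definition above) =====
set_option maxRecDepth 4096 in
theorem get_file_extension_spec : Claim_equal_get_file_extension := by
  intro f _
  unfold Spec_get_file_extension
  by_cases hemp : f = ""
  · subst hemp; decide
  · have hfne : (f == "") = false := by simp [hemp]
    rcases pvRfindDot (PySem.Chars.lower f.toList) with ⟨hrf, hnd⟩ | ⟨u, t, hcs, ht, hrf⟩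
    · -- no dot in the lowered name: A's endswith tests all fail, B's ext is ""
      have hends : ∀ t', PySem.Chars.endswith (PySem.Chars.lower f.toList) ('.' :: t') = false := by
        intro t'
        rw [Bool.eq_false_iff]
        intro h
        exact pvNoDotEnds _ t' hnd ((PySem.Chars.endswith_iff _ _).mp h)
      simp [get_file_extension, get_file_extension_alt, hfne,
        pvSupportedCppExtensions, pvSupportedCExtensions,
        PySem.Str.endswith_eq, PySem.Str.toList_lower, hends, hrf]
    · -- the lowered name splits at its last dot: ext = '.' :: t with t dot-free
      have hend : ∀ t', '.' ∉ t' →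
          PySem.Chars.endswith (PySem.Chars.lower f.toList) ('.' :: t') = decide (t' = t) := by
        intro t' ht'
        by_cases hq : t' = t
        · subst hq
          have : ('.' :: t') <:+ (PySem.Chars.lower f.toList) := by
            rw [hcs]
            exact List.suffix_append_of_suffix (List.suffix_refl _)
          simp [(PySem.Chars.endswith_iff _ _).mpr this]
        · have : PySem.Chars.endswith (PySem.Chars.lower f.toList) ('.' :: t') = false := by
            rw [Bool.eq_false_iff]
            intro h
            have := (PySem.Chars.endswith_iff _ _).mp h
            rw [hcs] at this
            exact hq ((pvEndsIff u t t' ht ht').mp this)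
          simp [this, hq]
      have h1 := hend ['c','p','p'] (by decide)
      have h2 := hend ['c','x','x'] (by decide)
      have h3 := hend ['c','c'] (by decide)
      have h4 := hend ['c','+','+'] (by decide)
      have h5 := hend ['h','p','p'] (by decide)
      have h6 := hend ['h','x','x'] (by decide)
      have h7 := hend ['h','+','+'] (by decide)
      have h8 := hend ['c'] (by decide)
      have h9 := hend ['h'] (by decide)
      have hidx : PySem.Str.rfind (PySem.Str.lower f) "." = (u.length : Int) := by
        rw [PySem.Str.rfind_eq, PySem.Str.toList_lower]
        exact hrf
      have hne : ((u.length : Int) == -1) = false := by simp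
      have hext : (PySem.Str.slice (PySem.Str.lower f) (some (u.length : Int)) none).toList
          = '.' :: t := by
        rw [PySem.Str.toList_slice, PySem.Chars.slice_eq_listSlice, PySem.Str.toList_lower,
          PySem.List.slice_from_natCast, hcs, List.drop_left]
      have p1 : (".cpp" : String).toList = '.' :: ['c','p','p'] := rfl
      have p2 : (".cxx" : String).toList = '.' :: ['c','x','x'] := rfl
      have p3 : (".cc" : String).toList = '.' :: ['c','c'] := rfl
      have p4 : (".c++" : String).toList = '.' :: ['c','+','+'] := rfl
      have p5 : (".hpp" : String).toList = '.' :: ['h','p','p'] := rfl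
      have p6 : (".hxx" : String).toList = '.' :: ['h','x','x'] := rfl
      have p7 : (".h++" : String).toList = '.' :: ['h','+','+'] := rfl
      have p8 : (".c" : String).toList = '.' :: ['c'] := rfl
      have p9 : (".h" : String).toList = '.' :: ['h'] := rfl
      have hmem : ∀ (p : String),
          ((PySem.Str.slice (PySem.Str.lower f) (some ((u.length : Nat) : Int)) none) = p)
          ↔ ('.' :: t = p.toList) := by
        intro p
        rw [← String.toList_inj, hext]
      simp [get_file_extension, get_file_extension_alt, hfne, hrf,
        pvSupportedCppExtensions, pvSupportedCExtensions, pvCppIndicators,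
        PySem.Str.endswith_eq, PySem.Str.toList_lower,
        p1, p2, p3, p4, p5, p6, p7, p8, p9, h1, h2, h3, h4, h5, h6, h7, h8, h9, hmem]
      by_cases c1 : t = ['c','p','p']; · simp [c1]
      by_cases c2 : t = ['c','x','x']; · simp [c2]
      by_cases c3 : t = ['c','c']; · simp [c3]
      by_cases c4 : t = ['c','+','+']; · simp [c4]
      by_cases c5 : t = ['h','p','p']; · simp [c5]
      by_cases c6 : t = ['h','x','x']; · simp [c6]
      by_cases c7 : t = ['h','+','+']; · simp [c7]
      by_cases c8 : t = ['c']; · simp [c8]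
      by_cases c9 : t = ['h']; · simp [c9]
      simp [eq_comm, c1, c2, c3, c4, c5, c6, c7, c8, c9]
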